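-- pv_equiv track=rewrite | github.com/QosmoInc/neutone_sdk | neutone_sdk/sqw.py | select_best_model_buffer_size
-- ===== SOURCE A (Python) =====
-- from typing import Optional, List
--
-- def select_best_model_buffer_size(io_bs: int, native_buffer_sizes: List[int]) -> int:
--     """
--     Given a DAW buffer size and a list of all the buffer sizes a Neutone model supports (usually only one, or
--     an empty list indicates all buffer sizes are supported), determine the optimal buffer size to use.
--     """
--     if not native_buffer_sizes:
--         return io_bs
--     if len(native_buffer_sizes) == 1:
--         return native_buffer_sizes[0]
--     native_buffer_sizes = sorted(native_buffer_sizes)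
--     for bs in native_buffer_sizes:
--         if bs % io_bs == 0:
--             return bs
--     for bs in native_buffer_sizes:
--         if bs > io_bs:
--             return bs
--     # TODO(cm): prefer near bs // 2 if 0 padded forward passes are enabled
--     # This is a workaround for torchscript not supporting lambda functions
--     diffs = [abs(bs - io_bs) for bs in native_buffer_sizes]
--     min_idx = diffs.index(min(diffs))
--     return native_buffer_sizes[min_idx]
-- ===== SOURCE B (Python) =====
-- def select_best_model_buffer_size(io_bs, native_buffer_sizes):
--     if not native_buffer_sizes:
--         return io_bs
--     if len(native_buffer_sizes) == 1:
--         return native_buffer_sizes[0]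
--     best_div = None   # smallest supported size divisible by io_bs
--     best_gt = None    # smallest supported size greater than io_bs
--     best_near = None  # nearest size; ties broken toward the smaller value
--     for bs in native_buffer_sizes:
--         if bs % io_bs == 0 and (best_div is None or bs < best_div):
--             best_div = bs
--         if bs > io_bs and (best_gt is None or bs < best_gt):
--             best_gt = bs
--         if best_near is None or abs(bs - io_bs) < abs(best_near - io_bs) or (
--             abs(bs - io_bs) == abs(best_near - io_bs) and bs < best_near
--         ):
--             best_near = bs
--     if best_div is not None:
--         return best_div
--     if best_gt is not None:
--         return best_gt
--     return best_near
-- ===== Notes on version B (the rewrite author's own statement) =====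
-- stated objective: alternative
-- what changed: Replaced the sort-then-scan structure (sorted copy, two sequential early-return scans, then a diffs list with min/index) by a single unsorted left-to-right pass that tracks three candidates: smallest divisible size, smallest size greater than io_bs, and nearest size with ties broken toward the smaller value.
import Mathlib
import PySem

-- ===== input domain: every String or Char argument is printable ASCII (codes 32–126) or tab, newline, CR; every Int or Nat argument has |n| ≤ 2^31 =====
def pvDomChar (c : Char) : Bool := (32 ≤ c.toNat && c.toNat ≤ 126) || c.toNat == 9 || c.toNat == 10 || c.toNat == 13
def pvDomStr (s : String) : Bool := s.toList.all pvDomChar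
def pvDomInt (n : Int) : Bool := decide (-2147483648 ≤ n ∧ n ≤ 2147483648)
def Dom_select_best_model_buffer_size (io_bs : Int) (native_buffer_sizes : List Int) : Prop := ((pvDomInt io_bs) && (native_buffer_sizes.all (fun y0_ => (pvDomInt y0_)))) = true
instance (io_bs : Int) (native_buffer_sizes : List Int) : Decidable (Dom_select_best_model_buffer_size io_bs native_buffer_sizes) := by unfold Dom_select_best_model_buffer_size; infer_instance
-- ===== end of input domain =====

-- B replaces A's sort + three sequential scans by a single left-to-right pass over the unsorted
-- list tracking three candidates (smallest divisible, smallest greater, nearest with smaller-value ties).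


-- shared predicates of both programs: "bs % io_bs == 0" and "bs > io_bs"
def pDiv (io_bs bs : Int) : Bool := PySem.Int.mod bs io_bs == 0
def pGt (io_bs bs : Int) : Bool := decide (bs > io_bs)

-- ===== PORT A =====
def select_best_model_buffer_size (io_bs : Int) (native_buffer_sizes : List Int) : Int :=
  if native_buffer_sizes = [] then io_bs
  else if native_buffer_sizes.length = 1 then PySem.List.pyGetD native_buffer_sizes 0 0
  else
    let s := PySem.List.sorted native_buffer_sizes (fun x => x) false
    match s.find? (fun bs => pDiv io_bs bs) with
    | some bs => bs
    | none =>
      match s.find? (fun bs => pGt io_bs bs) with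
      | some bs => bs
      | none =>
        let diffs := s.map (fun bs => |bs - io_bs|)
        match PySem.List.min? diffs (fun x => x) with
        | none => 0  -- unreachable: diffs nonempty
        | some m =>
          match PySem.List.index? diffs m with
          | none => 0  -- unreachable: m ∈ diffs
          | some min_idx => PySem.List.pyGetD s (min_idx : Int) 0

-- ===== PORT B =====
-- "abs(bs - io_bs) < abs(near - io_bs) or (abs(bs - io_bs) == abs(near - io_bs) and bs < near)"
def pNear (io_bs bs v : Int) : Bool := |bs - io_bs| < |v - io_bs| || (|bs - io_bs| == |v - io_bs| && decide (bs < v))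

-- one iteration of B's single loop; Option.all encodes "… is None or <cond>"
def altStep (io_bs : Int) (st : Option Int × Option Int × Option Int) (bs : Int) :
    Option Int × Option Int × Option Int :=
  (if pDiv io_bs bs && st.1.all (fun v => decide (bs < v)) then some bs else st.1,
   if pGt io_bs bs && st.2.1.all (fun v => decide (bs < v)) then some bs else st.2.1,
   if st.2.2.all (fun v => pNear io_bs bs v) then some bs else st.2.2)

def select_best_model_buffer_size_alt (io_bs : Int) (native_buffer_sizes : List Int) : Int :=
  if native_buffer_sizes = [] then io_bs
  else if native_buffer_sizes.length = 1 then PySem.List.pyGetD native_buffer_sizes 0 0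
  else
    match native_buffer_sizes.foldl (altStep io_bs) (none, none, none) with
    | (some d, _, _) => d
    | (none, some g, _) => g
    | (none, none, n) => n.getD 0  -- n is some _: the list is nonempty

-- ===== PRECONDITION & SPEC =====
-- Pre_ excludes exactly io_bs = 0 with at least two native sizes: there Python A (and B) raise
-- ZeroDivisionError on 'bs % io_bs'.
def Pre_select_best_model_buffer_size (io_bs : Int) (native_buffer_sizes : List Int) : Prop :=
  native_buffer_sizes.length ≤ 1 ∨ io_bs ≠ 0
instance (io_bs : Int) (native_buffer_sizes : List Int) : Decidable (Pre_select_best_model_buffer_size io_bs native_buffer_sizes) := by unfold Pre_select_best_model_buffer_size; infer_instance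
def pvWitness_select_best_model_buffer_size : Int × List Int := (3, [4, 6, 8])

def Spec_select_best_model_buffer_size (io_bs : Int) (native_buffer_sizes : List Int) (out : Int) : Prop := out = select_best_model_buffer_size_alt io_bs native_buffer_sizes
instance (io_bs : Int) (native_buffer_sizes : List Int) (out : Int) : Decidable (Spec_select_best_model_buffer_size io_bs native_buffer_sizes out) := by unfold Spec_select_best_model_buffer_size; infer_instance

-- ===== CLAIM (what is proved, stated in full; the proofs are below) =====
def Claim_equal_select_best_model_buffer_size : Prop := ∀ (io_bs : Int) (native_buffer_sizes : List Int), Dom_select_best_model_buffer_size io_bs native_buffer_sizes → Pre_select_best_model_buffer_size io_bs native_buffer_sizes → Spec_select_best_model_buffer_size io_bs native_buffer_sizes (select_best_model_buffer_size io_bs native_buffer_sizes)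

-- ===== LEMMAS AND PROOFS =====

-- "m is the minimal element of t satisfying P" (value of B's div/gt slots)
def IsOptMin (P : Int → Bool) (t : List Int) : Option Int → Prop
  | none => ∀ y ∈ t, ¬ P y = true
  | some m => m ∈ t ∧ P m = true ∧ ∀ y ∈ t, P y = true → m ≤ y

-- lexicographic "nearest, ties to the smaller value" order used by B's near slot
def lexLe (io_bs m y : Int) : Prop := |m - io_bs| < |y - io_bs| ∨ (|m - io_bs| = |y - io_bs| ∧ m ≤ y)

def IsLexMin (io_bs : Int) (t : List Int) : Option Int → Prop
  | none => t = []
  | some m => m ∈ t ∧ ∀ y ∈ t, lexLe io_bs m y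

theorem optMin_snoc (P : Int → Bool) (pre : List Int) (x : Int) (d : Option Int)
    (h : IsOptMin P pre d) :
    IsOptMin P (pre ++ [x]) (if P x && d.all (fun v => decide (x < v)) then some x else d) := by
  cases d with
  | none =>
    simp only [Option.all_none, Bool.and_true] at *
    by_cases hx : P x = true
    · simp only [hx, if_true, IsOptMin] at *
      refine ⟨by simp, hx, ?_⟩
      intro y hy _
      rcases List.mem_append.mp hy with hy | hy
      · exact absurd ‹P y = true› (h y hy)
      · simp only [List.mem_singleton] at hy; omega
    · have hx' : P x = false := by revert hx; cases P x <;> simp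
      simp only [IsOptMin, hx', Bool.false_eq_true]
      simp only [IsOptMin] at h
      intro y hy
      rcases List.mem_append.mp hy with hy | hy
      · exact h y hy
      · simp only [List.mem_singleton] at hy; subst hy; simp [hx']
  | some v =>
    simp only [IsOptMin, Option.all_some] at *
    obtain ⟨hv, hPv, hmin⟩ := h
    by_cases hc : (P x && decide (x < v)) = true
    · simp only [hc, if_true]
      simp only [Bool.and_eq_true, decide_eq_true_eq] at hc
      refine ⟨by simp, hc.1, ?_⟩
      intro y hy hPy
      rcases List.mem_append.mp hy with hy | hy
      · have := hmin y hy hPy; omega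
      · simp only [List.mem_singleton] at hy; omega
    · simp only [hc]
      refine ⟨List.mem_append.mpr (Or.inl hv), hPv, ?_⟩
      intro y hy hPy
      rcases List.mem_append.mp hy with hy | hy
      · exact hmin y hy hPy
      · simp only [List.mem_singleton] at hy; subst hy
        simp only [Bool.and_eq_true, decide_eq_true_eq, not_and, not_lt] at hc
        exact hc hPy
theorem lexMin_snoc (io_bs x : Int) (pre : List Int) (n : Option Int)
    (h : IsLexMin io_bs pre n) :
    IsLexMin io_bs (pre ++ [x]) (if n.all (fun v => pNear io_bs x v) then some x else n) := by
  cases n with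
  | none =>
    simp only [IsLexMin] at *
    subst h
    simp only [Option.all_none, if_true, List.nil_append]
    refine ⟨by simp, ?_⟩
    intro y hy
    simp only [List.mem_singleton] at hy; subst hy
    exact Or.inr ⟨rfl, le_rfl⟩
  | some v =>
    simp only [IsLexMin, Option.all_some] at *
    obtain ⟨hv, hmin⟩ := h
    by_cases hc : pNear io_bs x v = true
    · simp only [hc, if_true]
      simp only [pNear, Bool.or_eq_true, decide_eq_true_eq, Bool.and_eq_true, beq_iff_eq] at hc
      refine ⟨by simp, ?_⟩
      intro y hy
      rcases List.mem_append.mp hy with hy | hy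
      · have := hmin y hy
        unfold lexLe at *
        rcases hc with hc | hc <;> rcases this with h2 | h2 <;>
          [exact Or.inl (by omega); exact Or.inl (by omega);
           exact Or.inl (by omega); exact Or.inr (by omega)]
      · simp only [List.mem_singleton] at hy; subst hy
        exact Or.inr ⟨rfl, le_rfl⟩
    · simp only [hc]
      refine ⟨List.mem_append.mpr (Or.inl hv), ?_⟩
      intro y hy
      rcases List.mem_append.mp hy with hy | hy
      · exact hmin y hy
      · simp only [List.mem_singleton] at hy; subst hy
        simp only [pNear, Bool.or_eq_true, decide_eq_true_eq, Bool.and_eq_true, beq_iff_eq,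
          not_or, not_and, not_lt] at hc
        unfold lexLe
        omega

-- the loop invariant of B, pushed through the whole fold
theorem fold_inv (io_bs : Int) (t : List Int) : ∀ (pre : List Int)
    (st : Option Int × Option Int × Option Int),
    IsOptMin (pDiv io_bs) pre st.1 → IsOptMin (pGt io_bs) pre st.2.1 →
    IsLexMin io_bs pre st.2.2 →
    IsOptMin (pDiv io_bs) (pre ++ t) (t.foldl (altStep io_bs) st).1 ∧
    IsOptMin (pGt io_bs) (pre ++ t) (t.foldl (altStep io_bs) st).2.1 ∧
    IsLexMin io_bs (pre ++ t) (t.foldl (altStep io_bs) st).2.2 := by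
  induction t with
  | nil => intro pre st h1 h2 h3; simpa using ⟨h1, h2, h3⟩
  | cons x t ih =>
    intro pre st h1 h2 h3
    have hassoc : pre ++ x :: t = (pre ++ [x]) ++ t := by simp
    rw [hassoc, List.foldl_cons]
    exact ih (pre ++ [x]) (altStep io_bs st x)
      (optMin_snoc _ pre x st.1 h1) (optMin_snoc _ pre x st.2.1 h2)
      (lexMin_snoc io_bs x pre st.2.2 h3)

theorem find?_sorted_min {P : Int → Bool} {s : List Int} (hs : s.Pairwise (· ≤ ·))
    {x : Int} (h : s.find? P = some x) :
    x ∈ s ∧ P x = true ∧ ∀ y ∈ s, P y = true → x ≤ y := by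
  induction s with
  | nil => simp at h
  | cons a t ih =>
    rw [List.pairwise_cons] at hs
    rw [List.find?_cons] at h
    by_cases ha : P a = true
    · simp only [ha, Option.some_inj] at h
      subst h
      exact ⟨List.mem_cons_self, ha, by
        intro y hy _
        rcases List.mem_cons.mp hy with hy | hy
        · omega
        · exact hs.1 y hy⟩
    · simp only [ha] at h
      obtain ⟨hx, hPx, hmin⟩ := ih hs.2 h
      exact ⟨List.mem_cons_of_mem a hx, hPx, by
        intro y hy hPy
        rcases List.mem_cons.mp hy with hy | hy
        · subst hy; exact absurd hPy ha
        · exact hmin y hy hPy⟩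

-- characterization of A's third branch on the sorted list
theorem case3_char (io_bs : Int) (s : List Int) (hs : s.Pairwise (· ≤ ·)) (m : Int)
    (hm : PySem.List.min? (s.map (fun bs => |bs - io_bs|)) (fun x => x) = some m)
    (idx : Nat) (hidx : PySem.List.index? (s.map (fun bs => |bs - io_bs|)) m = some idx) :
    PySem.List.pyGetD s (idx : Int) 0 ∈ s ∧
    ∀ y ∈ s, lexLe io_bs (PySem.List.pyGetD s (idx : Int) 0) y := by
  have hminv := PySem.List.min?_isMin hm
  obtain ⟨pre, suf, hsplit, hlen, hnot⟩ := (PySem.List.index?_eq_some_iff _ _ _).mp hidx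
  obtain ⟨s1, s2, hseq, hmap1, hmap2⟩ := List.map_eq_append_iff.mp hsplit
  obtain ⟨x, s2', hs2, hfx, hmap2'⟩ := List.map_eq_cons_iff.mp hmap2
  subst hseq hs2
  have hlen1 : s1.length = idx := by
    have := congrArg List.length hmap1; simp at this; omega
  have hidxlt : (idx : Int) < (s1 ++ x :: s2').length := by
    simp; omega
  have hget : PySem.List.pyGetD (s1 ++ x :: s2') (idx : Int) 0 = x := by
    rw [PySem.List.pyGetD_natCast, ← hlen1]
    rw [List.getD_eq_getElem?_getD, List.getElem?_append_right (le_refl _)]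
    simp
  rw [hget]
  refine ⟨by simp, ?_⟩
  intro y hy
  have hmy : m ≤ |y - io_bs| := hminv _ (List.mem_map_of_mem hy)
  unfold lexLe
  rcases lt_or_eq_of_le hmy with hlt | heq
  · left; omega
  · right
    refine ⟨by omega, ?_⟩
    -- y has minimal diff: it cannot sit in s1, so sortedness gives x ≤ y
    rcases List.mem_append.mp hy with hy1 | hy2
    · exfalso
      apply hnot
      rw [heq, ← hmap1]
      exact List.mem_map_of_mem hy1
    · rcases List.mem_cons.mp hy2 with hy2 | hy2
      · omega
      · have := (List.pairwise_append.mp hs).2.1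
        rw [List.pairwise_cons] at this
        exact this.1 y hy2

theorem lex_unique (io_bs x r : Int) (hxr : lexLe io_bs x r) (hrx : lexLe io_bs r x) : x = r := by
  unfold lexLe at *; omega

-- ===== VERDICT (by name: the statement is the Claim_ definition above) =====
theorem select_best_model_buffer_size_spec : Claim_equal_select_best_model_buffer_size := by
  intro io_bs l _ _
  unfold Spec_select_best_model_buffer_size
  unfold select_best_model_buffer_size select_best_model_buffer_size_alt
  by_cases hnil : l = []
  · simp [hnil]
  · simp only [hnil, if_false]
    by_cases h1 : l.length = 1
    · simp [h1]
    · simp only [h1, if_false]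
      have hinv := fold_inv io_bs l [] (none, none, none)
        (by intro y hy; simp at hy) (by intro y hy; simp at hy) rfl
      simp only [List.nil_append] at hinv
      obtain ⟨hd, hg, hn⟩ := hinv
      rcases hres : l.foldl (altStep io_bs) (none, none, none) with ⟨d, g, n⟩
      rw [hres] at hd hg hn
      have hperm : (PySem.List.sorted l (fun x => x) false).Perm l := PySem.List.sorted_perm l (fun x => x) false
      have hpw : (PySem.List.sorted l (fun x => x) false).Pairwise (· ≤ ·) := by
        simpa using PySem.List.sorted_pairwise (xs := l) (key := fun x => x)
      cases d with
      | some dv =>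
        obtain ⟨hdv, hPdv, hdmin⟩ := hd
        cases hfind : (PySem.List.sorted l (fun x => x) false).find? (fun bs => pDiv io_bs bs) with
        | none =>
          exact absurd hPdv (by
            simpa using List.find?_eq_none.mp hfind dv (hperm.mem_iff.mpr hdv))
        | some bs =>
          obtain ⟨hbs, hPbs, hbmin⟩ := find?_sorted_min hpw hfind
          exact le_antisymm (hbmin dv (hperm.mem_iff.mpr hdv) hPdv)
            (hdmin bs (hperm.mem_iff.mp hbs) hPbs)
      | none =>
        have hfind : (PySem.List.sorted l (fun x => x) false).find? (fun bs => pDiv io_bs bs) = none :=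
          List.find?_eq_none.mpr (fun y hy => by simpa using hd y (hperm.subset hy))
        simp only [hfind]
        cases g with
        | some gv =>
          obtain ⟨hgv, hPgv, hgmin⟩ := hg
          cases hfind2 : (PySem.List.sorted l (fun x => x) false).find? (fun bs => pGt io_bs bs) with
          | none =>
            exact absurd hPgv (by
              simpa using List.find?_eq_none.mp hfind2 gv (hperm.mem_iff.mpr hgv))
          | some bs =>
            obtain ⟨hbs, hPbs, hbmin⟩ := find?_sorted_min hpw hfind2
            exact le_antisymm (hbmin gv (hperm.mem_iff.mpr hgv) hPgv)
              (hgmin bs (hperm.mem_iff.mp hbs) hPbs)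
        | none =>
          have hfind2 : (PySem.List.sorted l (fun x => x) false).find? (fun bs => pGt io_bs bs) = none :=
            List.find?_eq_none.mpr (fun y hy => by simpa using hg y (hperm.subset hy))
          simp only [hfind2]
          cases n with
          | none => exact absurd hn hnil
          | some nv =>
            obtain ⟨hnv, hnmin⟩ := hn
            have hsne : PySem.List.sorted l (fun x => x) false ≠ [] := by
              intro hcon
              exact hnil ((PySem.List.sorted_eq_nil_iff l (fun x => x) false).mp hcon)
            cases hm : PySem.List.min? ((PySem.List.sorted l (fun x => x) false).map
                (fun bs => |bs - io_bs|)) (fun x => x) with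
            | none =>
              exact absurd (by simpa using (PySem.List.min?_eq_none_iff _ _).mp hm) hsne
            | some m =>
              have hmmem := PySem.List.min?_mem hm
              cases hidx : PySem.List.index? ((PySem.List.sorted l (fun x => x) false).map
                  (fun bs => |bs - io_bs|)) m with
              | none =>
                exact absurd hmmem (by simpa using (PySem.List.index?_eq_none_iff _ _).mp hidx)
              | some idx =>
                simp only [hidx]
                obtain ⟨hxmem, hxlex⟩ := case3_char io_bs _ hpw m hm idx hidx
                exact lex_unique io_bs _ nv (hxlex nv (hperm.mem_iff.mpr hnv))
                  (hnmin _ (hperm.subset hxmem))
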